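-- pv_equiv track=rewrite | github.com/kyunhong/seat | app.py | get_slot_order
-- ===== SOURCE A (Python) =====
-- def get_slot_order(direction: str, num_rows: int, max_per_row: int) -> list:
--     """방향별 슬롯 인덱스 순서 반환"""
--     slots = []
--     if direction == 'A':
--         for r in range(num_rows):
--             for c in range(max_per_row):
--                 slots.append(r * max_per_row + c)
--     elif direction == 'B':
--         for c in range(max_per_row):
--             for r in range(num_rows):
--                 slots.append(r * max_per_row + c)
--     elif direction == 'C':
--         for r in range(num_rows):
--             for c in reversed(range(max_per_row)):
--                 slots.append(r * max_per_row + c)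
--     elif direction == 'D':
--         for r in reversed(range(num_rows)):
--             for c in range(max_per_row):
--                 slots.append(r * max_per_row + c)
--     elif direction == 'E':
--         for r in reversed(range(num_rows)):
--             for c in reversed(range(max_per_row)):
--                 slots.append(r * max_per_row + c)
--     elif direction == 'F':
--         for c in reversed(range(max_per_row)):
--             for r in range(num_rows):
--                 slots.append(r * max_per_row + c)
--     return slots
-- ===== SOURCE B (Python) =====
-- def _transpose(grid):
--     if not grid:
--         return []
--     ncols = min(len(row) for row in grid)
--     return [[row[c] for row in grid] for c in range(ncols)]
--
--
-- def get_slot_order(direction: str, num_rows: int, max_per_row: int) -> list: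
--     """방향별 슬롯 인덱스 순서 반환 (grid-based)"""
--     if direction not in ('A', 'B', 'C', 'D', 'E', 'F'):
--         return []
--     grid = [[r * max_per_row + c for c in range(max_per_row)] for r in range(num_rows)]
--     if direction == 'A':
--         rows = grid
--     elif direction == 'B':
--         rows = _transpose(grid)
--     elif direction == 'C':
--         rows = [list(reversed(row)) for row in grid]
--     elif direction == 'D':
--         rows = list(reversed(grid))
--     elif direction == 'E':
--         rows = [list(reversed(row)) for row in reversed(grid)]
--     else:  # 'F'
--         rows = list(reversed(_transpose(grid)))
--     return [x for row in rows for x in row]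
-- ===== Notes on version B (the rewrite author's own statement) =====
-- stated objective: alternative
-- what changed: B builds the A-order 2D grid once and derives each direction by list operations (flatten, per-row reverse, row reverse, transpose) instead of six hand-written nested index loops.
import Mathlib
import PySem

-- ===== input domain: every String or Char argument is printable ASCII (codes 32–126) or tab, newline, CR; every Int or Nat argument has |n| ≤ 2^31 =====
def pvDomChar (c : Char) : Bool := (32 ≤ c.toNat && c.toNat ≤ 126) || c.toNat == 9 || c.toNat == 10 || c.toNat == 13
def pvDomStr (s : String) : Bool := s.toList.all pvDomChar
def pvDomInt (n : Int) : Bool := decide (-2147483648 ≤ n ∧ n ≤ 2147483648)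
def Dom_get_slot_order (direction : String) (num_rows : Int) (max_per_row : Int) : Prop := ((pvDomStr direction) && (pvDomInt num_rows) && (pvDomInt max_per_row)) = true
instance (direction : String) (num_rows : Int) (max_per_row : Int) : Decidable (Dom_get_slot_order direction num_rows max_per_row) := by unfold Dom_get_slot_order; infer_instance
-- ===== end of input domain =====

-- B builds the A-order grid once and derives each direction by list operations
-- (flatten / per-row reverse / row-order reverse / transpose) instead of six nested index loops; objective: alternative.

-- ===== PORT A =====
def get_slot_order (direction : String) (num_rows : Int) (max_per_row : Int) : List Int :=
  let slots : List Int := []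
  if direction == "A" then
    (PySem.List.pyRange 0 num_rows 1).foldl (fun slots r =>
      (PySem.List.pyRange 0 max_per_row 1).foldl (fun slots c => slots ++ [r * max_per_row + c]) slots) slots
  else if direction == "B" then
    (PySem.List.pyRange 0 max_per_row 1).foldl (fun slots c =>
      (PySem.List.pyRange 0 num_rows 1).foldl (fun slots r => slots ++ [r * max_per_row + c]) slots) slots
  else if direction == "C" then
    (PySem.List.pyRange 0 num_rows 1).foldl (fun slots r =>
      (PySem.List.pyRange 0 max_per_row 1).reverse.foldl (fun slots c => slots ++ [r * max_per_row + c]) slots) slots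
  else if direction == "D" then
    (PySem.List.pyRange 0 num_rows 1).reverse.foldl (fun slots r =>
      (PySem.List.pyRange 0 max_per_row 1).foldl (fun slots c => slots ++ [r * max_per_row + c]) slots) slots
  else if direction == "E" then
    (PySem.List.pyRange 0 num_rows 1).reverse.foldl (fun slots r =>
      (PySem.List.pyRange 0 max_per_row 1).reverse.foldl (fun slots c => slots ++ [r * max_per_row + c]) slots) slots
  else if direction == "F" then
    (PySem.List.pyRange 0 max_per_row 1).reverse.foldl (fun slots c =>
      (PySem.List.pyRange 0 num_rows 1).foldl (fun slots r => slots ++ [r * max_per_row + c]) slots) slots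
  else slots

-- ===== PORT B =====
-- hand port of Source B's _transpose (exact: every index c stays below every row length,
-- since c ranges over the minimum row length, so getD never falls back to its default)
def pvTranspose (grid : List (List Int)) : List (List Int) :=
  match grid with
  | [] => []
  | r0 :: rs =>
      (List.range ((rs.map (·.length)).foldl min r0.length)).map
        (fun c => grid.map (fun row => row.getD c 0))

def get_slot_order_alt (direction : String) (num_rows : Int) (max_per_row : Int) : List Int :=
  if ["A", "B", "C", "D", "E", "F"].contains direction then
    let grid := (PySem.List.pyRange 0 num_rows 1).map (fun r =>
      (PySem.List.pyRange 0 max_per_row 1).map (fun c => r * max_per_row + c))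
    let rows :=
      if direction == "A" then grid
      else if direction == "B" then pvTranspose grid
      else if direction == "C" then grid.map List.reverse
      else if direction == "D" then grid.reverse
      else if direction == "E" then grid.reverse.map List.reverse
      else (pvTranspose grid).reverse
    rows.flatMap (fun row => row)
  else []

-- ===== PRECONDITION & SPEC =====
def Spec_get_slot_order (direction : String) (num_rows : Int) (max_per_row : Int) (out : List Int) : Prop := out = get_slot_order_alt direction num_rows max_per_row
instance (direction : String) (num_rows : Int) (max_per_row : Int) (out : List Int) : Decidable (Spec_get_slot_order direction num_rows max_per_row out) := by unfold Spec_get_slot_order; infer_instance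

-- ===== CLAIM (what is proved, stated in full; the proofs are below) =====
def Claim_equal_get_slot_order : Prop := ∀ (direction : String) (num_rows : Int) (max_per_row : Int), Dom_get_slot_order direction num_rows max_per_row → Spec_get_slot_order direction num_rows max_per_row (get_slot_order direction num_rows max_per_row)

-- ===== LEMMAS AND PROOFS =====

lemma pv_foldl_min_const (l : List Nat) (m : Nat) (h : ∀ x ∈ l, x = m) :
    l.foldl min m = m := by
  induction l with
  | nil => rfl
  | cons a t ih =>
      have ha : a = m := h a (by simp)
      simp only [List.foldl_cons, ha, min_self]
      exact ih (fun x hx => h x (by simp [hx]))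

lemma pv_flatMap_const_nil (l : List Int) : l.flatMap (fun _ => ([] : List Int)) = [] := by
  induction l with
  | nil => rfl
  | cons a t ih => simp [ih]

-- pvTranspose of the nonempty grid is the column-major list of columns
lemma pv_transpose_grid (n m : Int) (hn : 0 < n) :
    pvTranspose ((PySem.List.pyRange 0 n 1).map (fun r =>
        (PySem.List.pyRange 0 m 1).map (fun c => r * m + c))) =
      (PySem.List.pyRange 0 m 1).map (fun c =>
        (PySem.List.pyRange 0 n 1).map (fun r => r * m + c)) := by
  have hgrid : (PySem.List.pyRange 0 n 1).map (fun r =>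
      (PySem.List.pyRange 0 m 1).map (fun c => r * m + c)) =
      ((PySem.List.pyRange 0 m 1).map (fun c => (0 : Int) * m + c)) ::
        (PySem.List.pyRange 1 n 1).map (fun r =>
          (PySem.List.pyRange 0 m 1).map (fun c => r * m + c)) := by
    rw [PySem.List.pyRange_one_cons hn]; norm_num
  rw [hgrid]
  show (List.range _).map _ = _
  have hhead : ((PySem.List.pyRange 0 m 1).map (fun c => (0 : Int) * m + c)).length = m.toNat := by
    simp [PySem.List.length_pyRange_one]
  have hmin : (((PySem.List.pyRange 1 n 1).map (fun r =>
      (PySem.List.pyRange 0 m 1).map (fun c => r * m + c))).map (·.length)).foldl min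
      ((PySem.List.pyRange 0 m 1).map (fun c => (0 : Int) * m + c)).length = m.toNat := by
    rw [hhead]
    apply pv_foldl_min_const
    intro x hx
    simp only [List.map_map, List.mem_map] at hx
    obtain ⟨r, _, rfl⟩ := hx
    simp [PySem.List.length_pyRange_one]
  rw [hmin]
  conv_rhs => rw [PySem.List.pyRange_one 0 m]
  simp only [Int.sub_zero, List.map_map]
  apply List.map_congr_left
  intro c hc
  rw [List.mem_range] at hc
  rw [← hgrid]
  simp only [Function.comp, List.map_map]
  apply List.map_congr_left
  intro r _
  simp only [Function.comp_apply]
  rw [List.getD_eq_getElem _ _ (by simpa using hc)]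
  simp

theorem get_slot_order_spec' (direction : String) (num_rows : Int) (max_per_row : Int) :
    get_slot_order direction num_rows max_per_row =
      get_slot_order_alt direction num_rows max_per_row := by
  by_cases hA : direction = "A"
  · subst hA
    unfold get_slot_order get_slot_order_alt
    simp only [PySem.List.foldl_append_singleton_eq_map, PySem.List.foldl_append_eq_flatMap,
      List.nil_append, List.contains_cons, List.contains_nil, Bool.or_eq_true, beq_self_eq_true,
      if_true, String.reduceBEq, true_or, false_or, Bool.false_eq_true, if_false]
    simp [List.flatMap_map]
  by_cases hB : direction = "B"
  · subst hB
    unfold get_slot_order get_slot_order_alt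
    simp only [PySem.List.foldl_append_singleton_eq_map, PySem.List.foldl_append_eq_flatMap,
      List.nil_append, List.contains_cons, List.contains_nil, Bool.or_eq_true, beq_self_eq_true,
      if_true, String.reduceBEq, true_or, false_or, Bool.false_eq_true, if_false]
    by_cases hn : 0 < num_rows
    · rw [pv_transpose_grid _ _ hn, List.flatMap_map]
    · rw [PySem.List.pyRange_one_eq_nil (by omega : num_rows ≤ 0)]
      simp [pvTranspose, pv_flatMap_const_nil]
  by_cases hC : direction = "C"
  · subst hC
    unfold get_slot_order get_slot_order_alt
    simp only [PySem.List.foldl_append_singleton_eq_map, PySem.List.foldl_append_eq_flatMap,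
      List.nil_append, List.contains_cons, List.contains_nil, Bool.or_eq_true, beq_self_eq_true,
      if_true, String.reduceBEq, true_or, false_or, Bool.false_eq_true, if_false]
    simp [List.flatMap_map, List.map_reverse]
  by_cases hD : direction = "D"
  · subst hD
    unfold get_slot_order get_slot_order_alt
    simp only [PySem.List.foldl_append_singleton_eq_map, PySem.List.foldl_append_eq_flatMap,
      List.nil_append, List.contains_cons, List.contains_nil, Bool.or_eq_true, beq_self_eq_true,
      if_true, String.reduceBEq, true_or, false_or, Bool.false_eq_true, if_false]
    rw [← List.map_reverse, List.flatMap_map]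
  by_cases hE : direction = "E"
  · subst hE
    unfold get_slot_order get_slot_order_alt
    simp only [PySem.List.foldl_append_singleton_eq_map, PySem.List.foldl_append_eq_flatMap,
      List.nil_append, List.contains_cons, List.contains_nil, Bool.or_eq_true, beq_self_eq_true,
      if_true, String.reduceBEq, true_or, false_or, Bool.false_eq_true, if_false]
    rw [← List.map_reverse, List.map_map, List.flatMap_map]
    simp [Function.comp, List.map_reverse]
  by_cases hF : direction = "F"
  · subst hF
    unfold get_slot_order get_slot_order_alt
    simp only [PySem.List.foldl_append_singleton_eq_map, PySem.List.foldl_append_eq_flatMap,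
      List.nil_append, List.contains_cons, List.contains_nil, Bool.or_eq_true, beq_self_eq_true,
      if_true, String.reduceBEq, true_or, false_or, Bool.false_eq_true, if_false]
    by_cases hn : 0 < num_rows
    · rw [pv_transpose_grid _ _ hn, ← List.map_reverse, List.flatMap_map]
    · rw [PySem.List.pyRange_one_eq_nil (by omega : num_rows ≤ 0)]
      simp [pvTranspose, pv_flatMap_const_nil]
  unfold get_slot_order get_slot_order_alt
  simp [beq_iff_eq, hA, hB, hC, hD, hE, hF]

-- ===== VERDICT (by name: the statement is the Claim_ definition above) =====
theorem get_slot_order_spec : Claim_equal_get_slot_order := by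
  intro direction num_rows max_per_row _
  unfold Spec_get_slot_order
  exact get_slot_order_spec' direction num_rows max_per_row
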